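-- pv_equiv track=rewrite | github.com/LuanoRodrigues/3Cs-attribution-Framework | python_backend_legacy/llms/extract_pdf_ui.py | aggregate_subsections
-- ===== SOURCE A (Python) =====
-- from typing import  Union, Tuple
-- from typing import List, Dict, Optional, Any
-- from typing import Any, Dict, Iterable, List, Tuple
--
-- def aggregate_subsections(sections_list: List[Tuple[int, str, str]]) -> Dict[str, str]:
--     """
--     "Rolls up" content from subsections into their parent section.
--     """
--     if not sections_list: return {}
--
--     rolled_up_sections = {}
--     i = 0
--     while i < len(sections_list):
--         parent_level, parent_title, parent_content = sections_list[i]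
--         full_content_parts = [parent_content]
--
--         j = i + 1
--         while j < len(sections_list):
--             child_level, child_title, child_content = sections_list[j]
--             if child_level > parent_level:
--                 formatted_subsection = f"### {child_title}\n\n{child_content}"
--                 full_content_parts.append(formatted_subsection)
--                 j += 1
--             else:
--                 break
--
--         final_content = "\n\n".join(part for part in full_content_parts if part).strip()
--
--         if parent_title and final_content:
--             rolled_up_sections[parent_title] = final_content
--         i = j
--     return rolled_up_sections
-- ===== SOURCE B (Python) =====
-- def aggregate_subsections(sections_list):
--     """Roll up subsection content into parent sections — one flat pass with accumulator state."""
--     def flush(rolled, title, parts):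
--         final = "\n\n".join(p for p in parts if p).strip()
--         if title and final:
--             rolled[title] = final
--
--     rolled = {}
--     parent = None  # (level, title) of the current parent, or None
--     parts = []
--     for level, title, content in sections_list:
--         if parent is not None and level > parent[0]:
--             parts.append(f"### {title}\n\n{content}")
--         else:
--             if parent is not None:
--                 flush(rolled, parent[1], parts)
--             parent = (level, title)
--             parts = [content]
--     if parent is not None:
--         flush(rolled, parent[1], parts)
--     return rolled
-- ===== Notes on version B (the rewrite author's own statement) =====
-- stated objective: simpler
-- what changed: Replaced the nested while loops (outer parent cursor plus inner forward child scan with index juggling) by one flat for-loop that carries the pending parent and its content parts and flushes a group whenever a non-child section starts.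
import Mathlib
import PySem

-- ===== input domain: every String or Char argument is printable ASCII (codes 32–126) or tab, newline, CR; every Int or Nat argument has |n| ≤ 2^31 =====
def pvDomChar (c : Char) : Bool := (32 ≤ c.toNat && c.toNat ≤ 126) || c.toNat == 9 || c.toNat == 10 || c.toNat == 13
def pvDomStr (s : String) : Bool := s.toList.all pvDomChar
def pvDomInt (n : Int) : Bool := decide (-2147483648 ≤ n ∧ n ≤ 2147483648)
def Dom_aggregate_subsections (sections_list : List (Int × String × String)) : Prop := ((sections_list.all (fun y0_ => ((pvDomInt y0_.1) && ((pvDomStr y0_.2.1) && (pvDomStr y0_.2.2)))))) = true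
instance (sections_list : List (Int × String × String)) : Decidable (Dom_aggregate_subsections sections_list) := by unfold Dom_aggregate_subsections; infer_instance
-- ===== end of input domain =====

-- B replaces A's nested while loops by one flat accumulator pass; objective: simpler.

-- ===== PORT A =====
-- inner while loop: collect the formatted consecutive children (level > parent level) and the remainder
def pvCollectA (pl : Int) : List (Int × String × String) → List String × List (Int × String × String)
  | [] => ([], [])
  | (cl, ct, cc) :: rest =>
    if cl > pl then
      let r := pvCollectA pl rest
      (("### " ++ ct ++ "\n\n" ++ cc) :: r.1, r.2)
    else ([], (cl, ct, cc) :: rest)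

theorem pvCollectA_len (pl : Int) (l : List (Int × String × String)) :
    (pvCollectA pl l).2.length ≤ l.length := by
  induction l with
  | nil => simp [pvCollectA]
  | cons x rest ih =>
    obtain ⟨cl, ct, cc⟩ := x
    simp only [pvCollectA]
    split
    · exact Nat.le_succ_of_le ih
    · simp

-- final_content = "\n\n".join(part for part in parts if part).strip()
def pvFinalA (parts : List String) : String :=
  PySem.Str.strip (PySem.Str.join "\n\n" (parts.filter (fun p => p != "")))

-- outer while loop over the list, advancing past each parent's children
def pvLoopA (d : PySem.Dict String String) : List (Int × String × String) → PySem.Dict String String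
  | [] => d
  | (pl, pt, pc) :: rest =>
    let r := pvCollectA pl rest
    let fc := pvFinalA (pc :: r.1)
    let d' := if pt ≠ "" ∧ fc ≠ "" then d.insert pt fc else d
    pvLoopA d' r.2
termination_by l => l.length
decreasing_by exact Nat.lt_succ_of_le (pvCollectA_len _ _)

def aggregate_subsections (sections_list : List (Int × String × String)) : List (String × String) :=
  if sections_list.isEmpty then []
  else (pvLoopA PySem.Dict.empty sections_list).items

-- ===== PORT B =====
-- flush(rolled, title, parts)
def pvFlushB (d : PySem.Dict String String) (title : String) (parts : List String) : PySem.Dict String String :=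
  let fc := PySem.Str.strip (PySem.Str.join "\n\n" (parts.filter (fun p => p != "")))
  if title ≠ "" ∧ fc ≠ "" then d.insert title fc else d

-- one step of the flat for-loop; state = (rolled, pending parent, parts)
def pvStepB (st : PySem.Dict String String × Option (Int × String) × List String)
    (sec : Int × String × String) :
    PySem.Dict String String × Option (Int × String) × List String :=
  match st, sec with
  | (d, some (pl, pt), parts), (lvl, title, content) =>
    if lvl > pl then (d, some (pl, pt), parts ++ ["### " ++ title ++ "\n\n" ++ content])
    else (pvFlushB d pt parts, some (lvl, title), [content])
  | (d, none, _), (lvl, title, content) => (d, some (lvl, title), [content])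

def aggregate_subsections_alt (sections_list : List (Int × String × String)) : List (String × String) :=
  let st := sections_list.foldl pvStepB (PySem.Dict.empty, none, [])
  (match st.2.1 with
   | some (_, pt) => pvFlushB st.1 pt st.2.2
   | none => st.1).items

-- ===== PRECONDITION & SPEC =====
def Spec_aggregate_subsections (sections_list : List (Int × String × String)) (out : List (String × String)) : Prop := out = aggregate_subsections_alt sections_list
instance (sections_list : List (Int × String × String)) (out : List (String × String)) : Decidable (Spec_aggregate_subsections sections_list out) := by unfold Spec_aggregate_subsections; infer_instance

-- ===== CLAIM (what is proved, stated in full; the proofs are below) =====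
def Claim_equal_aggregate_subsections : Prop := ∀ (sections_list : List (Int × String × String)), Dom_aggregate_subsections sections_list → Spec_aggregate_subsections sections_list (aggregate_subsections sections_list)

-- ===== LEMMAS AND PROOFS =====

-- B's fold from a pending-parent state, followed by the final flush, equals A's loop
-- after A flushes that parent with its collected children and continues on the remainder.
theorem pvKey (l : List (Int × String × String)) :
    ∀ (d : PySem.Dict String String) (pl : Int) (pt : String) (parts : List String),
    (match (l.foldl pvStepB (d, some (pl, pt), parts)).2.1 with
     | some (_, t) => pvFlushB (l.foldl pvStepB (d, some (pl, pt), parts)).1 t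
         (l.foldl pvStepB (d, some (pl, pt), parts)).2.2
     | none => (l.foldl pvStepB (d, some (pl, pt), parts)).1)
    = pvLoopA (pvFlushB d pt (parts ++ (pvCollectA pl l).1)) (pvCollectA pl l).2 := by
  induction l with
  | nil => intro d pl pt parts; simp [pvCollectA, pvLoopA]
  | cons x rest ih =>
    intro d pl pt parts
    obtain ⟨cl, ct, cc⟩ := x
    by_cases h : cl > pl
    · simp only [List.foldl_cons, pvStepB, if_pos h, pvCollectA]
      rw [ih]
      simp [List.append_assoc]
    · simp only [List.foldl_cons, pvStepB, if_neg h, pvCollectA]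
      rw [ih]
      simp only [List.append_nil]
      conv_rhs => rw [pvLoopA]
      rfl

theorem aggregate_subsections_eq (l : List (Int × String × String)) :
    aggregate_subsections l = aggregate_subsections_alt l := by
  cases l with
  | nil => rfl
  | cons x rest =>
    obtain ⟨pl, pt, pc⟩ := x
    unfold aggregate_subsections aggregate_subsections_alt
    simp only [List.isEmpty_cons, List.foldl_cons, pvStepB]
    rw [pvKey]
    conv_lhs => rw [pvLoopA]
    rfl

-- ===== VERDICT (by name: the statement is the Claim_ definition above) =====
theorem aggregate_subsections_spec : Claim_equal_aggregate_subsections := by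
  intro l _
  unfold Spec_aggregate_subsections
  exact aggregate_subsections_eq l
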